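-- pv_equiv track=rewrite | github.com/am17an/ProjectEuler | 577.py | coefficient_of_x_power_n
-- ===== SOURCE A (Python) =====
-- def coefficient_of_x_power_n(n):
--     """Calculate coefficient of x^n in 1/((1-x)^3*(1-x^3)^2)"""
--     coeff = 0
--
--     # Sum over all j such that 3j <= n
--     for j in range(n // 3 + 1):
--         i = n - 3 * j
--         if i >= 0:
--             # Coefficient from (1-x)^(-3) is C(i+2, 2) = (i+2)(i+1)/2
--             # Coefficient from (1-x^3)^(-2) is (j+1)
--             term = ((i + 2) * (i + 1) // 2) * (j + 1)
--             coeff += term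
--
--     return coeff
-- ===== SOURCE B (Python) =====
-- def coefficient_of_x_power_n(n):
--     """Closed-form O(1) evaluation of the same sum."""
--     if n < 0:
--         return 0
--     M = n // 3 + 1
--     p = (M * (66 - 15 * M - 54 * M * M + 27 * M ** 3)
--          + n * M * (42 + 18 * M - 24 * M * M)
--          + 6 * n * n * M * (1 + M))
--     return p // 24
-- ===== Notes on version B (the rewrite author's own statement) =====
-- stated objective: faster
-- what changed: Replaced the O(n) loop summing C(i+2,2)*(j+1) over j with the closed-form quartic polynomial of that summation, evaluated in O(1).
import Mathlib
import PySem

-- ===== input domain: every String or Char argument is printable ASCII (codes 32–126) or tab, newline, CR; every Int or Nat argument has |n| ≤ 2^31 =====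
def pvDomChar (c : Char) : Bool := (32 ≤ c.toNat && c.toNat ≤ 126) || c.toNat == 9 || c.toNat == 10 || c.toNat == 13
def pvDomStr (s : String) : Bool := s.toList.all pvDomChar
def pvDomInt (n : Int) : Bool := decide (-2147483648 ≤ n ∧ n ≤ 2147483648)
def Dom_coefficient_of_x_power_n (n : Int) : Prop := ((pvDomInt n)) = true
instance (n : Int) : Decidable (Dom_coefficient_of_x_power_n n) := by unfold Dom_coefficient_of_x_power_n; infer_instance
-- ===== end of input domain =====

-- B replaces A's O(n) loop by the closed-form polynomial of the summation (objective: faster, asymptotic).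

-- ===== PORT A =====
def coefficient_of_x_power_n (n : Int) : Int :=
  (PySem.List.pyRange 0 (PySem.Int.floordiv n 3 + 1) 1).foldl
    (fun coeff j =>
      let i := n - 3 * j
      if i ≥ 0 then
        coeff + (PySem.Int.floordiv ((i + 2) * (i + 1)) 2) * (j + 1)
      else coeff) 0

-- ===== PORT B =====
def coefficient_of_x_power_n_alt (n : Int) : Int :=
  if n < 0 then 0
  else
    let M := PySem.Int.floordiv n 3 + 1
    let p := M * (66 - 15 * M - 54 * M * M + 27 * M ^ 3)
             + n * M * (42 + 18 * M - 24 * M * M)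
             + 6 * n * n * M * (1 + M)
    PySem.Int.floordiv p 24

-- ===== PRECONDITION & SPEC =====
def Spec_coefficient_of_x_power_n (n : Int) (out : Int) : Prop := out = coefficient_of_x_power_n_alt n
instance (n : Int) (out : Int) : Decidable (Spec_coefficient_of_x_power_n n out) := by unfold Spec_coefficient_of_x_power_n; infer_instance

-- ===== CLAIM (what is proved, stated in full; the proofs are below) =====
def Claim_equal_coefficient_of_x_power_n : Prop := ∀ (n : Int), Dom_coefficient_of_x_power_n n → Spec_coefficient_of_x_power_n n (coefficient_of_x_power_n n)

-- ===== LEMMAS AND PROOFS =====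

-- (i+2)(i+1) is even, so Python's // 2 is exact there
theorem pv_fd2 (a : Int) : 2 * PySem.Int.floordiv ((a + 2) * (a + 1)) 2 = (a + 2) * (a + 1) := by
  rw [PySem.Int.floordiv_eq_ediv_of_pos (by omega : (0:Int) < 2)]
  obtain ⟨k, hk⟩ : Even ((a + 1) * (a + 1 + 1)) := Int.even_mul_succ_self (a + 1)
  have hk2 : (a + 2) * (a + 1) = k + k := by linarith [hk]
  omega

-- 24 × (A's partial sum over range(M)) as a polynomial, while every term's i = n - 3j stays ≥ 0
theorem pv_sumA (n : Int) : ∀ (M : ℕ), 3 * ((M : Int) - 1) ≤ n →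
    24 * ((PySem.List.pyRange 0 (M : Int) 1).foldl
      (fun coeff j =>
        let i := n - 3 * j
        if i ≥ 0 then
          coeff + (PySem.Int.floordiv ((i + 2) * (i + 1)) 2) * (j + 1)
        else coeff) 0)
    = 66 * (M : Int) - 15 * (M : Int) ^ 2 - 54 * (M : Int) ^ 3 + 27 * (M : Int) ^ 4
      + 42 * n * (M : Int) + 18 * n * (M : Int) ^ 2 - 24 * n * (M : Int) ^ 3
      + 6 * n ^ 2 * (M : Int) + 6 * n ^ 2 * (M : Int) ^ 2 := by
  intro M
  induction M with
  | zero =>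
      intro _
      rw [PySem.List.pyRange_one_eq_nil (by norm_num)]
      norm_num
  | succ M ih =>
      intro h
      have hM : (0 : Int) ≤ (M : Int) := Int.natCast_nonneg M
      have hle : 3 * ((M : Int) - 1) ≤ n := by push_cast at h ⊢; omega
      have hsplit := PySem.List.pyRange_one_append 0 (M : Int) ((M : Int) + 1) hM (by omega)
      have hcast : ((M + 1 : ℕ) : Int) = (M : Int) + 1 := by push_cast; ring
      rw [hcast, hsplit, PySem.List.pyRange_one_singleton, List.foldl_append]
      simp only [List.foldl_cons, List.foldl_nil]
      have hpos : n - 3 * (M : Int) ≥ 0 := by push_cast at h; omega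
      rw [if_pos hpos]
      have hfd := pv_fd2 (n - 3 * (M : Int))
      have ihv := ih hle
      linear_combination ihv + (12 * ((M : Int) + 1)) * hfd

-- ===== VERDICT (by name: the statement is the Claim_ definition above) =====
theorem coefficient_of_x_power_n_spec : Claim_equal_coefficient_of_x_power_n := by
  intro n _
  unfold Spec_coefficient_of_x_power_n coefficient_of_x_power_n coefficient_of_x_power_n_alt
  by_cases hn : n < 0
  · have hfd : PySem.Int.floordiv n 3 < 0 := by
      rw [PySem.Int.floordiv_lt_iff_lt_mul (by norm_num : (0:Int) < 3)]; omega
    rw [PySem.List.pyRange_one_eq_nil (by omega)]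
    simp [hn]
  · rw [not_lt] at hn
    set m := PySem.Int.floordiv n 3 with hm
    have hbr : m * 3 ≤ n ∧ n < (m + 1) * 3 :=
      (PySem.Int.floordiv_eq_iff_of_pos (by norm_num : (0:Int) < 3)).1 hm.symm
    have hm0 : 0 ≤ m := by nlinarith [hbr.1, hbr.2]
    have hMnat : ((m + 1).toNat : Int) = m + 1 := Int.toNat_of_nonneg (by omega)
    have hsum := pv_sumA n (m + 1).toNat (by rw [hMnat]; omega)
    rw [hMnat] at hsum
    rw [if_neg (by omega)]
    set S := (PySem.List.pyRange 0 (m + 1) 1).foldl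
      (fun coeff j =>
        let i := n - 3 * j
        if i ≥ 0 then
          coeff + (PySem.Int.floordiv ((i + 2) * (i + 1)) 2) * (j + 1)
        else coeff) 0 with hS
    have hp : (m + 1) * (66 - 15 * (m + 1) - 54 * (m + 1) * (m + 1) + 27 * (m + 1) ^ 3)
             + n * (m + 1) * (42 + 18 * (m + 1) - 24 * (m + 1) * (m + 1))
             + 6 * n * n * (m + 1) * (1 + (m + 1)) = 24 * S := by
      rw [hsum]; ring
    show S = PySem.Int.floordiv
      ((m + 1) * (66 - 15 * (m + 1) - 54 * (m + 1) * (m + 1) + 27 * (m + 1) ^ 3)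
        + n * (m + 1) * (42 + 18 * (m + 1) - 24 * (m + 1) * (m + 1))
        + 6 * n * n * (m + 1) * (1 + (m + 1))) 24
    rw [hp, PySem.Int.floordiv_eq_ediv_of_pos (by norm_num : (0:Int) < 24),
        Int.mul_ediv_cancel_left _ (by norm_num)]
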